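-- pv_equiv track=rewrite | github.com/TechnoG11/Random-Python-Files | Alphabetical Order Converter/main.py | alphabetical
-- ===== SOURCE A (Python) =====
-- def alphabetical(string):
--     #Dict {a-z:1-26}
--     A_1 = {"a": 1, "b": 2, "c": 3, "d": 4, "e": 5, "f": 6, "g": 7, "h": 8, "i": 9, "j": 10, "k": 11, "l": 12, "m": 13,
--            "n": 14, "o": 15, "p": 16, "q": 17, "r": 18, "s": 19, "t": 20, "u": 21, "v": 22, "w": 23, "x": 24, "y": 25,
--            "Z": 26}
--
--     new_string = []
--     for i in range(len(string)):
--         # Converts each letter into a number. "to" -> [[20, t], [15, o]]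
--         new_string.append([A_1[(string[(i)]).lower()], string[(i)]])
--     new_string.sort()
--
--     final_string = ""
--     for i in range(len(new_string)):
--         #Converts back to letters
--         final_string += new_string[i][1]
--
--     return final_string
-- ===== SOURCE B (Python) =====
-- def alphabetical(string):
--     # Counting sort: tally the characters in one pass, then emit the alphabet
--     # in case-insensitive order (uppercase before lowercase on ties), each
--     # letter repeated by its count.  O(n + k) instead of O(n log n).
--     counts = {}
--     for ch in string:
--         counts[ch] = counts.get(ch, 0) + 1
--     order = "AaBbCcDdEeFfGgHhIiJjKkLlMmNnOoPpQqRrSsTtUuVvWwXxYyZz"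
--     return "".join(c * counts.get(c, 0) for c in order)
-- ===== Notes on version B (the rewrite author's own statement) =====
-- stated objective: faster
-- what changed: Replaces build-pair-list-then-comparison-sort with a counting sort: one pass builds a character counter, then the full alphabet is emitted in case-insensitive order (uppercase before lowercase on ties), each letter repeated by its count; Pre_ excludes exactly the inputs on which A raises KeyError (any character whose lowercase form is not a key of A_1, i.e. anything other than a-y/A-Y, since the dict's stray 'Z' key is unreachable through .lower()).
-- outside the precondition, e.g. on alphabetical('Z'): A raises KeyError, B returns 'Z'
import Mathlib
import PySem

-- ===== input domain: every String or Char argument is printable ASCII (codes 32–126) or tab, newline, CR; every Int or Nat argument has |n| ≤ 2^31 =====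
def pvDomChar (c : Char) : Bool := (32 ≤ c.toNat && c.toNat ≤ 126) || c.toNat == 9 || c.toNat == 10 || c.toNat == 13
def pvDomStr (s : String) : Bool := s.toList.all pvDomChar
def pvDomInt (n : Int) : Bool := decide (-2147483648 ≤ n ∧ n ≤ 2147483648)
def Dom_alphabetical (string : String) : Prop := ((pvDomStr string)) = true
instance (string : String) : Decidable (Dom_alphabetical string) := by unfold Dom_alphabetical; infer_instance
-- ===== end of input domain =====

-- B is a counting sort (one counting pass, then the alphabet emitted in case-insensitive order,
-- uppercase before lowercase on ties, each letter repeated by its count) instead of A's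
-- pair-list comparison sort.

-- ===== PORT A =====
-- Python's dict A_1 maps 1-character strings to ints; ported with Char keys (a 1-character
-- string and its character correspond one to one, with the same comparison order on ASCII).
def pvA1 : PySem.Dict Char Int := PySem.Dict.ofList
  [('a',1),('b',2),('c',3),('d',4),('e',5),('f',6),('g',7),('h',8),('i',9),('j',10),('k',11),
   ('l',12),('m',13),('n',14),('o',15),('p',16),('q',17),('r',18),('s',19),('t',20),('u',21),
   ('v',22),('w',23),('x',24),('y',25),('Z',26)]

-- (string[i]).lower() for the 1-character string, via PySem.Chars.lower
def pvLower1 (c : Char) : Char := match PySem.Chars.lower [c] with | [d] => d | _ => c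

def alphabetical (string : String) : String :=
  let cs := string.toList
  -- for i in range(len(string)): new_string.append([A_1[string[i].lower()], string[i]])
  -- A_1[…] raises KeyError where get? is none (excluded by Pre_); .getD 0 is never the result there
  let new_string : List (Int × Char) :=
    (PySem.List.pyRange 0 (PySem.List.len cs)).foldl
      (fun acc i =>
        let ch := PySem.List.pyGetD cs i ' '
        acc ++ [((pvA1.get? (pvLower1 ch)).getD 0, ch)]) []
  -- new_string.sort(): lexicographic on the [int, str] pairs
  let ns := PySem.List.sorted2 new_string (fun p => p.1) (fun p => p.2)
  -- for i in range(len(new_string)): final_string += new_string[i][1]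
  String.ofList (ns.foldl (fun acc p => acc ++ [p.2]) [])

-- ===== PORT B =====
-- order = "AaBbCcDdEeFfGgHhIiJjKkLlMmNnOoPpQqRrSsTtUuVvWwXxYyZz"
def pvOrderB : List Char :=
  ['A','a','B','b','C','c','D','d','E','e','F','f','G','g','H','h','I','i','J','j','K','k','L','l','M','m','N','n','O','o','P','p','Q','q','R','r','S','s','T','t','U','u','V','v','W','w','X','x','Y','y','Z','z']

def alphabetical_alt (string : String) : String :=
  -- counts[ch] = counts.get(ch, 0) + 1
  let counts : PySem.Dict Char Int :=
    string.toList.foldl (fun d ch => PySem.Dict.modify d ch 0 (· + 1)) PySem.Dict.empty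
  -- "".join(c * counts.get(c, 0) for c in order)
  String.ofList ((pvOrderB.map (fun c => List.replicate (counts.getD c 0).toNat c)).flatten)

-- ===== PRECONDITION & SPEC =====
-- Pre_ excludes exactly the inputs on which A raises KeyError: any character whose
-- lower-case form is not a key of A_1 (i.e. any character other than a-y, A-Y;
-- the dict's stray 'Z' key is unreachable through .lower()).
def Pre_alphabetical (string : String) : Prop :=
  (string.toList.all (fun c =>
    (97 ≤ c.toNat && c.toNat ≤ 121) || (65 ≤ c.toNat && c.toNat ≤ 89))) = true
instance (string : String) : Decidable (Pre_alphabetical string) := by unfold Pre_alphabetical; infer_instance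
def pvWitness_alphabetical : String := "Hello"

def Spec_alphabetical (string : String) (out : String) : Prop := out = alphabetical_alt string
instance (string : String) (out : String) : Decidable (Spec_alphabetical string out) := by unfold Spec_alphabetical; infer_instance

-- ===== CLAIM (what is proved, stated in full; the proofs are below) =====
def Claim_equal_alphabetical : Prop := ∀ (string : String), Dom_alphabetical string → Pre_alphabetical string → Spec_alphabetical string (alphabetical string)

-- ===== LEMMAS AND PROOFS =====

-- the 50 characters Pre_ admits, in B's output order (proof helper)
def pvOrder : List Char :=
  ['A','a','B','b','C','c','D','d','E','e','F','f','G','g','H','h','I','i','J','j','K','k','L','l','M','m','N','n','O','o','P','p','Q','q','R','r','S','s','T','t','U','u','V','v','W','w','X','x','Y','y']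

-- combined sort key realising the lexicographic order on (Int × Char)
def pvKey (p : Int × Char) : Int := p.1 * 4294967296 + (p.2.toNat : Int)
def pvF (c : Char) : Int × Char := ((pvA1.get? (pvLower1 c)).getD 0, c)

theorem pv_char_toNat_lt (c : Char) : c.toNat < 4294967296 :=
  UInt32.toNat_lt_size c.val

theorem pvKey_inj : Function.Injective pvKey := by
  intro p q h
  have hp := pv_char_toNat_lt p.2
  have hq := pv_char_toNat_lt q.2
  unfold pvKey at h
  have h1 : p.1 = q.1 := by omega
  have h2 : p.2.toNat = q.2.toNat := by omega
  have h3 : p.2 = q.2 := by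
    apply Char.ext; apply UInt32.toNat_inj.mp; exact h2
  exact Prod.ext h1 h3

-- Python's tuple comparison on (int, char) pairs agrees with comparison of the combined key
theorem pv_before_eq (a b : Int × Char) :
    (decide (a.1 < b.1) || (!decide (b.1 < a.1) && decide (a.2 < b.2)))
      = decide (pvKey a < pvKey b) := by
  have ha := pv_char_toNat_lt a.2
  have hb := pv_char_toNat_lt b.2
  have hc : (a.2 < b.2) ↔ (a.2.toNat < b.2.toNat) := by
    rw [Char.lt_def, UInt32.lt_iff_toNat_lt]; exact Iff.rfl
  rw [Bool.eq_iff_iff]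
  simp only [Bool.or_eq_true, Bool.and_eq_true, Bool.not_eq_true', decide_eq_true_iff,
    decide_eq_false_iff_not, hc]
  unfold pvKey
  omega

theorem pv_sorted2_eq_sorted (xs : List (Int × Char)) :
    PySem.List.sorted2 xs (fun p => p.1) (fun p => p.2) = PySem.List.sorted xs pvKey := by
  rw [PySem.List.sorted_eq_foldl_insertBy]
  simp only [PySem.List.sorted2, Bool.false_eq_true, if_false, pv_before_eq]

theorem pv_char_eq_of_toNat {c d : Char} (h : c.toNat = d.toNat) : c = d :=
  Char.ext (UInt32.toNat_inj.mp h)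

-- a character admitted by Pre_ is one of the 50 characters of pvOrder
theorem pv_mem_order (c : Char)
    (h : (97 ≤ c.toNat ∧ c.toNat ≤ 121) ∨ (65 ≤ c.toNat ∧ c.toNat ≤ 89)) : c ∈ pvOrder := by
  have hmap : pvOrder.map Char.toNat =
      [65,97,66,98,67,99,68,100,69,101,70,102,71,103,72,104,73,105,74,106,75,107,76,108,
       77,109,78,110,79,111,80,112,81,113,82,114,83,115,84,116,85,117,86,118,87,119,88,120,89,121] := by
    rfl
  have hm : c.toNat ∈ pvOrder.map Char.toNat := by
    rw [hmap]
    simp only [List.mem_cons, List.not_mem_nil, or_false]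
    omega
  obtain ⟨d, hd, hdc⟩ := List.mem_map.mp hm
  exact (pv_char_eq_of_toNat hdc).symm ▸ hd

-- counts of the bucket concatenation
theorem pv_count_buckets (l : List Char) (hnd : l.Nodup) (cnt : Char → Nat) (x : Char) :
    ((l.map (fun c => List.replicate (cnt c) c)).flatten.count x)
      = if x ∈ l then cnt x else 0 := by
  induction l with
  | nil => simp
  | cons c t ih =>
    simp only [List.map_cons, List.flatten_cons, List.count_append, List.nodup_cons] at *
    rw [ih hnd.2, List.count_replicate]
    by_cases hxc : x = c
    · subst hxc
      simp [hnd.1]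
    · simp [hxc, Ne.symm hxc]

set_option maxRecDepth 8000 in
theorem pv_perm_buckets (cs : List Char) (hpre : ∀ c ∈ cs, c ∈ pvOrder) :
    cs.Perm ((pvOrder.map (fun c => List.replicate (cs.count c) c)).flatten) := by
  rw [List.perm_iff_count]
  intro x
  rw [pv_count_buckets _ (by decide) _ x]
  by_cases hx : x ∈ pvOrder
  · simp [hx]
  · simp only [hx, if_false]
    rw [List.count_eq_zero]
    intro hmem
    exact hx (hpre x hmem)

set_option maxHeartbeats 1000000 in
set_option maxRecDepth 8000 in
theorem pv_order_pairwise :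
    pvOrder.Pairwise (fun c d => pvKey (pvF c) ≤ pvKey (pvF d)) := by
  decide

theorem pv_target_pairwise (cnt : Char → Nat) :
    ((pvOrder.map (fun c => List.replicate (cnt c) (pvF c))).flatten).Pairwise
      (fun a b => pvKey a ≤ pvKey b) := by
  rw [List.pairwise_flatten]
  constructor
  · intro l hl
    simp only [List.mem_map] at hl
    obtain ⟨c, _, rfl⟩ := hl
    exact List.pairwise_replicate.mpr (Or.inr le_rfl)
  · rw [List.pairwise_map]
    refine pv_order_pairwise.imp_of_mem ?_
    intro c d hc hd h x hx y hy
    rw [List.eq_of_mem_replicate hx, List.eq_of_mem_replicate hy]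
    exact h

theorem pv_pairs_eq (s : String) :
    (PySem.List.pyRange 0 (PySem.List.len s.toList)).foldl
      (fun acc i => acc ++ [pvF (PySem.List.pyGetD s.toList i ' ')]) []
      = s.toList.map pvF := by
  rw [PySem.List.foldl_append_singleton_eq_map]
  rw [show (PySem.List.pyRange 0 (PySem.List.len s.toList)).map
        (fun i => pvF (PySem.List.pyGetD s.toList i ' '))
      = ((PySem.List.pyRange 0 (PySem.List.len s.toList)).map
        (fun i => PySem.List.pyGetD s.toList i ' ')).map pvF from by rw [List.map_map]; rfl]
  rw [PySem.List.map_pyGetD_pyRange_zero]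
  rfl

theorem pv_counts_eq (s : String) (c : Char) :
    ((s.toList.foldl (fun d ch => PySem.Dict.modify d ch 0 (· + 1)) (PySem.Dict.empty : PySem.Dict Char Int)).getD c 0).toNat
      = s.toList.count c := by
  rw [← PySem.Dict.counter_eq_foldl, PySem.Dict.getD_counter]
  exact Int.toNat_natCast _

-- ===== VERDICT (by name: the statement is the Claim_ definition above) =====
theorem alphabetical_spec : Claim_equal_alphabetical := by
  intro s _ hpre
  unfold Pre_alphabetical at hpre
  simp only [List.all_eq_true, Bool.or_eq_true, Bool.and_eq_true, decide_eq_true_iff] at hpre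
  unfold Spec_alphabetical alphabetical alphabetical_alt
  simp only []
  have hpairs := pv_pairs_eq s
  have hB : (pvOrderB.map (fun c =>
      List.replicate (((s.toList.foldl (fun d ch => PySem.Dict.modify d ch 0 (· + 1))
        (PySem.Dict.empty : PySem.Dict Char Int)).getD c 0)).toNat c))
      = pvOrderB.map (fun c => List.replicate (s.toList.count c) c) := by
    apply List.map_congr_left
    intro c _
    rw [pv_counts_eq]
  rw [hB]
  -- 'Z' and 'z' are excluded by Pre_, so their buckets are empty and the full-alphabet
  -- concatenation collapses to the one over the 50 admitted characters
  have hcZ : s.toList.count 'Z' = 0 := by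
    rw [List.count_eq_zero]; intro h; have := hpre _ h; simp [Char.toNat] at this
  have hcz : s.toList.count 'z' = 0 := by
    rw [List.count_eq_zero]; intro h; have := hpre _ h; simp [Char.toNat] at this
  have hBsplit : (pvOrderB.map (fun c => List.replicate (s.toList.count c) c)).flatten
      = (pvOrder.map (fun c => List.replicate (s.toList.count c) c)).flatten := by
    have h52 : pvOrderB = pvOrder ++ ['Z', 'z'] := rfl
    rw [h52, List.map_append, List.flatten_append]
    simp [hcZ, hcz]
  rw [hBsplit]
  -- name the lists
  set Bchars := (pvOrder.map (fun c => List.replicate (s.toList.count c) c)).flatten with hBchars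
  have hsorted_eq : PySem.List.sorted (s.toList.map pvF) pvKey = Bchars.map pvF := by
    apply PySem.List.eq_of_perm_of_pairwise_le_of_injective pvKey pvKey_inj
    · exact (PySem.List.sorted_perm _ _ _).trans
        ((pv_perm_buckets s.toList (fun c hc => pv_mem_order c (hpre c hc))).map pvF)
    · exact PySem.List.sorted_pairwise _ _
    · rw [hBchars, List.map_flatten, List.map_map]
      rw [show List.map pvF ∘ (fun c => List.replicate (s.toList.count c) c)
            = fun c => List.replicate (s.toList.count c) (pvF c) from by
          funext c; simp [List.map_replicate]]
      exact pv_target_pairwise _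
  rw [pv_sorted2_eq_sorted]
  show String.ofList ((PySem.List.sorted
      ((PySem.List.pyRange 0 (PySem.List.len s.toList)).foldl
        (fun acc i => acc ++ [pvF (PySem.List.pyGetD s.toList i ' ')]) []) pvKey).foldl
      (fun acc p => acc ++ [p.2]) []) = String.ofList Bchars
  rw [hpairs, hsorted_eq, PySem.List.foldl_append_singleton_eq_map]
  congr 1
  rw [List.nil_append, List.map_map]
  have : (Prod.snd ∘ pvF) = id := by funext c; rfl
  rw [this, List.map_id]
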